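-- pv_equiv track=rewrite | github.com/kimsh2948/CodingTest_Study | test3.py | solution
-- ===== SOURCE A (Python) =====
-- import heapq
--
-- def solution(N, coffee_times):
--     heap = [[0, i] for i in range(N)]
--     heapq.heapify(heap)
--     answer = []
--
--     for time in coffee_times:
--         end_time, idx = heapq.heappop(heap)
--         end_time += time
--         heapq.heappush(heap, [end_time, idx])
--         answer.append(idx+1)
--
--     return answer
-- ===== SOURCE B (Python) =====
-- def solution(N, coffee_times):
--     ends = [0] * N
--     answer = []
--     for time in coffee_times:
--         i = ends.index(min(ends))
--         answer.append(i + 1)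
--         ends[i] += time
--     return answer
-- ===== Notes on version B (the rewrite author's own statement) =====
-- stated objective: simpler
-- what changed: Replaces the binary heap of [end_time, idx] pairs with a flat list of per-machine end times, picking each task's machine by ends.index(min(ends)) (first minimum = lowest index, matching the heap's lexicographic tie-break).
import Mathlib
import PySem

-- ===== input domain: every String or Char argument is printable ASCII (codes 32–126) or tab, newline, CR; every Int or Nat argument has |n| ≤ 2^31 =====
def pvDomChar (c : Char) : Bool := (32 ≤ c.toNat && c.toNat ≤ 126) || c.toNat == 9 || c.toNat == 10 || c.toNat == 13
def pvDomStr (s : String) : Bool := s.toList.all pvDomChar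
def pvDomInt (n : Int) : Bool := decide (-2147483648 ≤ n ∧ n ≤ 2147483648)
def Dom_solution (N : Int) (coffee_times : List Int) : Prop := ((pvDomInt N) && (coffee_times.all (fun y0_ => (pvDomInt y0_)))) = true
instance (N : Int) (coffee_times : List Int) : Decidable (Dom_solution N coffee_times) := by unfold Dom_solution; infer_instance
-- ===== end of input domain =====

-- B replaces A's binary heap of [end_time, machine] pairs by a flat list of end times
-- scanned with min/index each round (objective: simpler); equal outputs on Pre_.

-- ===== PORT A =====
-- Python compares the two-element lists [end_time, idx] lexicographically.
def pvLt (x y : Int × Int) : Bool := x.1 < y.1 || (x.1 == y.1 && x.2 < y.2)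

-- heapq._siftdown(heap, startpos, pos) with newitem = heap[pos] (heapq's local variables
-- parentpos/parent are inlined; the while loop is the structural recursion on pos).
def pvSiftdown (startpos : Nat) (heap : List (Int × Int)) (pos : Nat) (newitem : Int × Int) :
    List (Int × Int) :=
  if _h : startpos < pos then
    if pvLt newitem heap[(pos - 1) / 2]! then
      pvSiftdown startpos (heap.set pos heap[(pos - 1) / 2]!) ((pos - 1) / 2) newitem
    else heap.set pos newitem
  else heap.set pos newitem
termination_by pos
decreasing_by omega

-- heapq._siftup(heap, pos) with newitem = heap[pos] (the childpos variable after the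
-- right-child test is the duplicated `if … then 2*pos+2 else 2*pos+1` expression).
def pvSiftup (endpos startpos : Nat) (heap : List (Int × Int)) (pos : Nat) (newitem : Int × Int) :
    List (Int × Int) :=
  if _h : 2 * pos + 1 < endpos then
    pvSiftup endpos startpos
      (heap.set pos heap[(if 2 * pos + 2 < endpos && !(pvLt heap[2 * pos + 1]! heap[2 * pos + 2]!) then 2 * pos + 2 else 2 * pos + 1)]!)
      (if 2 * pos + 2 < endpos && !(pvLt heap[2 * pos + 1]! heap[2 * pos + 2]!) then 2 * pos + 2 else 2 * pos + 1)
      newitem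
  else
    pvSiftdown startpos (heap.set pos newitem) pos newitem
termination_by endpos - pos
decreasing_by split <;> omega

def pvHeappush (heap : List (Int × Int)) (item : Int × Int) : List (Int × Int) :=
  pvSiftdown 0 (heap ++ [item]) ((heap ++ [item]).length - 1) item

def pvHeappop (heap : List (Int × Int)) : (Int × Int) × List (Int × Int) :=
  let lastelt := heap.getLast!
  let heap := heap.dropLast
  if 0 < heap.length then
    (heap[0]!, pvSiftup heap.length 0 (heap.set 0 lastelt) 0 lastelt)
  else (lastelt, heap)

def pvHeapify (a : List (Int × Int)) : List (Int × Int) :=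
  (List.range (a.length / 2)).reverse.foldl (fun h i => pvSiftup h.length i h i h[i]!) a

def solution (N : Int) (coffee_times : List Int) : List Int :=
  (coffee_times.foldl
    (fun (st : List (Int × Int) × List Int) time =>
      let p := pvHeappop st.1
      (pvHeappush p.2 (p.1.1 + time, p.1.2), st.2 ++ [p.1.2 + 1]))
    (pvHeapify ((PySem.List.pyRange 0 N 1).map (fun i => ((0 : Int), i))), [])).2

-- ===== PORT B =====
-- ends = [0] * N; each round: i = ends.index(min(ends)); answer.append(i+1); ends[i] += time.
def solution_alt (N : Int) (coffee_times : List Int) : List Int :=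
  (coffee_times.foldl
    (fun (st : List Int × List Int) time =>
      let m := (PySem.List.min? st.1 (fun x => x)).getD 0
      let i := (PySem.List.index? st.1 m).getD 0
      (st.1.set i (st.1.getD i 0 + time), st.2 ++ [(i : Int) + 1]))
    (PySem.List.pyRepeat [(0 : Int)] N, [])).2

-- ===== PRECONDITION & SPEC =====
-- Pre_ excludes only N ≤ 0 with a nonempty task list: there A raises IndexError
-- (heappop from an empty heap) and B raises ValueError (min of an empty list).
def Pre_solution (N : Int) (coffee_times : List Int) : Prop := 1 ≤ N ∨ coffee_times = []
instance (N : Int) (coffee_times : List Int) : Decidable (Pre_solution N coffee_times) := by unfold Pre_solution; infer_instance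
def pvWitness_solution : Int × List Int := (3, [5, 3, 3, 2, 1, 4])

def Spec_solution (N : Int) (coffee_times : List Int) (out : List Int) : Prop := out = solution_alt N coffee_times
instance (N : Int) (coffee_times : List Int) (out : List Int) : Decidable (Spec_solution N coffee_times out) := by unfold Spec_solution; infer_instance

-- ===== CLAIM (what is proved, stated in full; the proofs are below) =====
def Claim_equal_solution : Prop := ∀ (N : Int) (coffee_times : List Int), Dom_solution N coffee_times → Pre_solution N coffee_times → Spec_solution N coffee_times (solution N coffee_times)

-- ===== LEMMAS AND PROOFS =====

-- ---- the lexicographic order on (end_time, idx) pairs ----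
theorem pvLt_iff (x y : Int × Int) : pvLt x y = true ↔ (x.1 < y.1 ∨ (x.1 = y.1 ∧ x.2 < y.2)) := by
  simp [pvLt]

theorem pvLt_eq_false_iff (x y : Int × Int) :
    pvLt x y = false ↔ (y.1 < x.1 ∨ (y.1 = x.1 ∧ y.2 ≤ x.2)) := by
  rw [← Bool.not_eq_true, pvLt_iff]; omega

theorem pvLt_irrefl (x : Int × Int) : pvLt x x = false := by
  rw [pvLt_eq_false_iff]; omega

theorem pvLt_asymm {x y : Int × Int} (h : pvLt x y = true) : pvLt y x = false := by
  rw [pvLt_iff] at h; rw [pvLt_eq_false_iff]; omega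

theorem pvLt_trans_ff {x y z : Int × Int} (h1 : pvLt y x = false) (h2 : pvLt z y = false) :
    pvLt z x = false := by
  rw [pvLt_eq_false_iff] at h1 h2 ⊢; omega

theorem pvLt_tt_ff {x y z : Int × Int} (h1 : pvLt x y = true) (h2 : pvLt z y = false) :
    pvLt z x = false := by
  rw [pvLt_iff] at h1; rw [pvLt_eq_false_iff] at h2 ⊢; omega

-- ---- parent/descendant structure of the implicit binary tree ----
def hpar (c : Nat) : Nat := (c - 1) / 2

def hDesc (s c : Nat) : Prop := ∃ k, hpar^[k] c = s

theorem hpar_lt {c : Nat} (h : 0 < c) : hpar c < c := by unfold hpar; omega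

theorem hDesc_refl (s : Nat) : hDesc s s := ⟨0, rfl⟩

theorem iterate_hpar_le : ∀ (k c : Nat), hpar^[k] c ≤ c := by
  intro k
  induction k with
  | zero => intro c; simp
  | succ k IH =>
    intro c
    rw [Function.iterate_succ_apply]
    exact le_trans (IH (hpar c)) (by unfold hpar; omega)

theorem hDesc_le {s c : Nat} (h : hDesc s c) : s ≤ c := by
  obtain ⟨k, hk⟩ := h; exact hk ▸ iterate_hpar_le k c

theorem hDesc_par {s c : Nat} (h : hDesc s c) (hne : c ≠ s) : hDesc s (hpar c) := by
  obtain ⟨k, hk⟩ := h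
  cases k with
  | zero => simp at hk; exact absurd hk hne
  | succ k => exact ⟨k, by rw [← Function.iterate_succ_apply]; exact hk⟩

theorem hDesc_child {s p c : Nat} (h : hDesc s p) (hc : hpar c = p) : hDesc s c := by
  obtain ⟨k, hk⟩ := h
  exact ⟨k + 1, by rw [Function.iterate_succ_apply, hc, hk]⟩

theorem hDesc_zero : ∀ c, hDesc 0 c := by
  intro c
  induction c using Nat.strong_induction_on with
  | _ c IH =>
    rcases Nat.eq_zero_or_pos c with h | h
    · exact h ▸ hDesc_refl 0
    · exact hDesc_child (IH (hpar c) (hpar_lt h)) rfl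

-- ---- indexing and multiset helpers ----
theorem getBang_set {α : Type} [Inhabited α] (l : List α) (i c : Nat) (v : α)
    (hc : c < l.length) : (l.set i v)[c]! = if i = c then v else l[c]! := by
  have hc' : c < (l.set i v).length := by simpa using hc
  rw [getElem!_pos (l.set i v) c hc', List.getElem_set]
  by_cases h : i = c
  · rw [if_pos h, if_pos h]
  · rw [if_neg h, if_neg h, getElem!_pos l c hc]

theorem perm_set_set (l : List (Int × Int)) (p c : Nat) (it : Int × Int)
    (hp : p < l.length) (hc : c < l.length) (hpc : p ≠ c) :
    ((l.set p l[c]!).set c it).Perm (l.set p it) := by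
  rw [getElem!_pos l c hc]
  refine List.perm_iff_count.mpr fun x => ?_
  have h1 : c < (l.set p l[c]).length := by simpa using hc
  rw [List.count_set h1, List.count_set hp, List.count_set hp, List.getElem_set, if_neg hpc]
  split_ifs <;> omega

def IsHeap (l : List (Int × Int)) : Prop :=
  ∀ c, 0 < c → c < l.length → pvLt l[c]! l[hpar c]! = false

-- ---- heap-shape invariants for _siftdown (bubble item up towards startpos) ----
theorem sd_base {l : List (Int × Int)} {s pos : Nat} {it : Int × Int}
    (hlen : pos < l.length) (hdesc : hDesc s pos)
    (H1 : ∀ c, 0 < c → c < l.length → hDesc s c → c ≠ s → c ≠ pos → pvLt l[c]! l[hpar c]! = false)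
    (H2 : ∀ c, 0 < c → c < l.length → hpar c = pos → pvLt l[c]! it = false)
    (hstop : s < pos → pvLt it l[hpar pos]! = false) :
    (l.set pos it).length = l.length ∧ (l.set pos it).Perm (l.set pos it) ∧
    (∀ c, 0 < c → c < l.length → hDesc s c → c ≠ s →
      pvLt (l.set pos it)[c]! (l.set pos it)[hpar c]! = false) ∧
    (∀ k, k < l.length → ¬ hDesc s k → (l.set pos it)[k]! = l[k]!) := by
  refine ⟨by simp, List.Perm.refl _, ?_, ?_⟩
  · intro c hc0 hclen hcdesc hcs
    have hparlen : hpar c < l.length := lt_trans (hpar_lt hc0) hclen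
    rw [getBang_set l pos c it hclen, getBang_set l pos (hpar c) it hparlen]
    by_cases hcp : pos = c
    · subst hcp
      have hspos : s < pos := lt_of_le_of_ne (hDesc_le hcdesc) (Ne.symm hcs)
      have hppne : ¬ pos = hpar pos := by have := hpar_lt hc0; omega
      rw [if_pos rfl, if_neg hppne]
      exact hstop hspos
    · rw [if_neg hcp]
      by_cases hpc : hpar c = pos
      · rw [if_pos hpc.symm]; exact H2 c hc0 hclen hpc
      · rw [if_neg (fun h => hpc h.symm)]
        exact H1 c hc0 hclen hcdesc hcs (fun h => hcp h.symm)
  · intro k hk hkdesc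
    have hne : ¬ pos = k := fun h => hkdesc (h ▸ hdesc)
    rw [getBang_set l pos k it hk, if_neg hne]

theorem siftdown_spec :
    ∀ (d pos : Nat) (l : List (Int × Int)) (s : Nat) (it : Int × Int),
      pos ≤ d → pos < l.length → hDesc s pos →
      (∀ c, 0 < c → c < l.length → hDesc s c → c ≠ s → c ≠ pos → pvLt l[c]! l[hpar c]! = false) →
      (∀ c, 0 < c → c < l.length → hpar c = pos → pvLt l[c]! it = false) →
      (s < pos → ∀ c, 0 < c → c < l.length → hpar c = pos → pvLt l[c]! l[hpar pos]! = false) →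
      (pvSiftdown s l pos it).length = l.length ∧
      (pvSiftdown s l pos it).Perm (l.set pos it) ∧
      (∀ c, 0 < c → c < l.length → hDesc s c → c ≠ s →
        pvLt (pvSiftdown s l pos it)[c]! (pvSiftdown s l pos it)[hpar c]! = false) ∧
      (∀ k, k < l.length → ¬ hDesc s k → (pvSiftdown s l pos it)[k]! = l[k]!) := by
  intro d
  induction d with
  | zero =>
    intro pos l s it hd hlen hdesc H1 H2 H3
    have hpos : pos = 0 := Nat.le_zero.mp hd
    subst hpos
    rw [pvSiftdown, dif_neg (Nat.not_lt_zero s)]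
    exact sd_base hlen hdesc H1 H2 (fun h => absurd h (Nat.not_lt_zero s))
  | succ d IH =>
    intro pos l s it hd hlen hdesc H1 H2 H3
    rw [pvSiftdown]
    by_cases hsp : s < pos
    · rw [dif_pos hsp]
      by_cases hlt : pvLt it l[(pos - 1) / 2]! = true
      · rw [if_pos hlt]
        have hpos0 : 0 < pos := by omega
        have hppeq : hpar pos = (pos - 1) / 2 := rfl
        have hpplt : (pos - 1) / 2 < pos := by omega
        have hpplen : (pos - 1) / 2 < l.length := lt_trans hpplt hlen
        have hposns : pos ≠ s := by omega
        have hdpp : hDesc s ((pos - 1) / 2) := hppeq ▸ hDesc_par hdesc hposns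
        have hval : ∀ c, c < l.length →
            (l.set pos l[(pos - 1) / 2]!)[c]! = if pos = c then l[(pos - 1) / 2]! else l[c]! :=
          fun c hc => getBang_set l pos c _ hc
        have H1' : ∀ c, 0 < c → c < (l.set pos l[(pos - 1) / 2]!).length → hDesc s c → c ≠ s →
            c ≠ (pos - 1) / 2 →
            pvLt (l.set pos l[(pos - 1) / 2]!)[c]! (l.set pos l[(pos - 1) / 2]!)[hpar c]! = false := by
          intro c hc0 hclen' hcd hcs hcpp
          have hclen : c < l.length := by simpa using hclen'
          have hparlen : hpar c < l.length := lt_trans (hpar_lt hc0) hclen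
          rw [hval c hclen, hval (hpar c) hparlen]
          by_cases hc_pos : pos = c
          · subst hc_pos
            have hne : ¬ pos = hpar pos := by have := hpar_lt hc0; omega
            rw [if_pos rfl, if_neg hne]
            exact pvLt_irrefl _
          · rw [if_neg hc_pos]
            by_cases hpar_pos : pos = hpar c
            · rw [if_pos hpar_pos]
              exact hppeq ▸ H3 hsp c hc0 hclen hpar_pos.symm
            · rw [if_neg hpar_pos]
              exact H1 c hc0 hclen hcd hcs (fun h => hc_pos h.symm)
        have H2' : ∀ c, 0 < c → c < (l.set pos l[(pos - 1) / 2]!).length →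
            hpar c = (pos - 1) / 2 → pvLt (l.set pos l[(pos - 1) / 2]!)[c]! it = false := by
          intro c hc0 hclen' hparc
          have hclen : c < l.length := by simpa using hclen'
          rw [hval c hclen]
          by_cases hc_pos : pos = c
          · rw [if_pos hc_pos]; exact pvLt_asymm hlt
          · rw [if_neg hc_pos]
            have hcd : hDesc s c := hDesc_child hdpp hparc
            have hcs : c ≠ s := by
              have h1 := hDesc_le hdpp
              have h2 := hpar_lt hc0
              omega
            have hedge := H1 c hc0 hclen hcd hcs (fun h => hc_pos h.symm)
            rw [hparc] at hedge
            exact pvLt_tt_ff hlt hedge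
        have H3' : s < (pos - 1) / 2 → ∀ c, 0 < c → c < (l.set pos l[(pos - 1) / 2]!).length →
            hpar c = (pos - 1) / 2 →
            pvLt (l.set pos l[(pos - 1) / 2]!)[c]!
              (l.set pos l[(pos - 1) / 2]!)[hpar ((pos - 1) / 2)]! = false := by
          intro hspp c hc0 hclen' hparc
          have hclen : c < l.length := by simpa using hclen'
          have hpp0 : 0 < (pos - 1) / 2 := by omega
          have hparpp_lt : hpar ((pos - 1) / 2) < (pos - 1) / 2 := hpar_lt hpp0
          have hparpp_len : hpar ((pos - 1) / 2) < l.length := lt_trans (lt_trans hparpp_lt hpplt) hlen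
          have hppne_pos : ¬ pos = hpar ((pos - 1) / 2) := by
            have := hpar_lt hpp0; omega
          have epp : pvLt l[(pos - 1) / 2]! l[hpar ((pos - 1) / 2)]! = false :=
            H1 ((pos - 1) / 2) hpp0 hpplen hdpp (by omega) (by omega)
          rw [hval c hclen, hval (hpar ((pos - 1) / 2)) hparpp_len, if_neg hppne_pos]
          by_cases hc_pos : pos = c
          · rw [if_pos hc_pos]; exact epp
          · rw [if_neg hc_pos]
            have hcd : hDesc s c := hDesc_child hdpp hparc
            have hcs : c ≠ s := by
              have h1 := hDesc_le hdpp
              have h2 := hpar_lt hc0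
              omega
            have hedge := H1 c hc0 hclen hcd hcs (fun h => hc_pos h.symm)
            rw [hparc] at hedge
            exact pvLt_trans_ff epp hedge
        obtain ⟨ihlen, ihperm, ihheap, ihunch⟩ :=
          IH ((pos - 1) / 2) (l.set pos l[(pos - 1) / 2]!) s it (by omega)
            (by simpa using hpplen) hdpp H1' H2' H3'
        rw [List.length_set] at ihlen
        refine ⟨ihlen, ?_, ?_, ?_⟩
        · exact ihperm.trans (perm_set_set l pos ((pos - 1) / 2) it hlen hpplen (by omega))
        · intro c hc0 hclen hcd hcs
          exact ihheap c hc0 (by simpa using hclen) hcd hcs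
        · intro k hk hkd
          have hkpos : ¬ pos = k := fun h => hkd (h ▸ hdesc)
          rw [ihunch k (by simpa using hk) hkd, hval k hk, if_neg hkpos]
      · rw [if_neg hlt]
        exact sd_base hlen hdesc H1 H2 (fun _ => by rwa [Bool.not_eq_true] at hlt)
    · rw [dif_neg hsp]
      exact sd_base hlen hdesc H1 H2 (fun h => absurd h hsp)

-- ---- heap-shape invariants for _siftup (sink the hole at pos, then _siftdown) ----
theorem siftup_spec :
    ∀ (d pos : Nat) (l : List (Int × Int)) (s : Nat) (it : Int × Int),
      l.length - pos ≤ d → pos < l.length → hDesc s pos →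
      (∀ c, 0 < c → c < l.length → hDesc s c → c ≠ s → c ≠ pos → hpar c ≠ pos →
        pvLt l[c]! l[hpar c]! = false) →
      (s < pos → ∀ c, 0 < c → c < l.length → hpar c = pos → pvLt l[c]! l[hpar pos]! = false) →
      (pvSiftup l.length s l pos it).length = l.length ∧
      (pvSiftup l.length s l pos it).Perm (l.set pos it) ∧
      (∀ c, 0 < c → c < l.length → hDesc s c → c ≠ s →
        pvLt (pvSiftup l.length s l pos it)[c]! (pvSiftup l.length s l pos it)[hpar c]! = false) ∧
      (∀ k, k < l.length → ¬ hDesc s k → (pvSiftup l.length s l pos it)[k]! = l[k]!) := by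
  intro d
  induction d with
  | zero =>
    intro pos l s it hd hlen _ _ _
    exact absurd hlen (by omega)
  | succ d IH =>
    intro pos l s it hd hlen hdesc G1 G2
    rw [pvSiftup]
    by_cases hch : 2 * pos + 1 < l.length
    · rw [dif_pos hch]
      have key : ∀ cp : Nat, 0 < cp → cp < l.length → hpar cp = pos →
          (∀ o, 0 < o → o < l.length → hpar o = pos → o ≠ cp → pvLt l[o]! l[cp]! = false) →
          (pvSiftup l.length s (l.set pos l[cp]!) cp it).length = l.length ∧
          (pvSiftup l.length s (l.set pos l[cp]!) cp it).Perm (l.set pos it) ∧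
          (∀ c, 0 < c → c < l.length → hDesc s c → c ≠ s →
            pvLt (pvSiftup l.length s (l.set pos l[cp]!) cp it)[c]!
              (pvSiftup l.length s (l.set pos l[cp]!) cp it)[hpar c]! = false) ∧
          (∀ k, k < l.length → ¬ hDesc s k →
            (pvSiftup l.length s (l.set pos l[cp]!) cp it)[k]! = l[k]!) := by
        intro cp hcp0 hcplen hcppar F
        have hposcp : pos < cp := by unfold hpar at hcppar; omega
        have hdcp : hDesc s cp := hDesc_child hdesc hcppar
        have hval : ∀ c, c < l.length →
            (l.set pos l[cp]!)[c]! = if pos = c then l[cp]! else l[c]! :=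
          fun c hc => getBang_set l pos c _ hc
        have G1' : ∀ c, 0 < c → c < (l.set pos l[cp]!).length → hDesc s c → c ≠ s → c ≠ cp →
            hpar c ≠ cp → pvLt (l.set pos l[cp]!)[c]! (l.set pos l[cp]!)[hpar c]! = false := by
          intro c hc0 hclen' hcd hcs hccp hparccp
          have hclen : c < l.length := by simpa using hclen'
          have hparlen : hpar c < l.length := lt_trans (hpar_lt hc0) hclen
          rw [hval c hclen, hval (hpar c) hparlen]
          by_cases hcpos : pos = c
          · subst hcpos
            have hsp : s < pos := lt_of_le_of_ne (hDesc_le hcd) (Ne.symm hcs)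
            have hne : ¬ pos = hpar pos := by have := hpar_lt hc0; omega
            rw [if_pos rfl, if_neg hne]
            exact G2 hsp cp (by omega) hcplen hcppar
          · rw [if_neg hcpos]
            by_cases hcparpos : pos = hpar c
            · rw [if_pos hcparpos]
              exact F c hc0 hclen hcparpos.symm hccp
            · rw [if_neg hcparpos]
              exact G1 c hc0 hclen hcd hcs (fun h => hcpos h.symm) (fun h => hcparpos h.symm)
        have G2' : s < cp → ∀ c, 0 < c → c < (l.set pos l[cp]!).length → hpar c = cp →
            pvLt (l.set pos l[cp]!)[c]! (l.set pos l[cp]!)[hpar cp]! = false := by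
          intro _ c hc0 hclen' hparc
          have hclen : c < l.length := by simpa using hclen'
          have hcgt : cp < c := by
            have := hpar_lt hc0; omega
          have hcpos : ¬ pos = c := by omega
          rw [hval c hclen, if_neg hcpos, hcppar, hval pos (lt_trans hposcp hcplen), if_pos rfl]
          have hcd : hDesc s c := hDesc_child hdcp hparc
          have hcs : c ≠ s := by have := hDesc_le hdesc; omega
          have hedge := G1 c hc0 hclen hcd hcs (by omega) (by omega)
          rw [hparc] at hedge
          exact hedge
        obtain ⟨ihlen, ihperm, ihheap, ihunch⟩ :=
          IH cp (l.set pos l[cp]!) s it (by simp only [List.length_set]; omega)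
            (by simpa using hcplen) hdcp G1' G2'
        rw [List.length_set] at ihlen ihperm ihheap ihunch
        refine ⟨ihlen, ?_, ihheap, ?_⟩
        · exact ihperm.trans (perm_set_set l pos cp it hlen hcplen (by omega))
        · intro k hk hkd
          have hkpos : ¬ pos = k := fun h => hkd (h ▸ hdesc)
          rw [ihunch k hk hkd, hval k hk, if_neg hkpos]
      by_cases hb : (decide (2 * pos + 2 < l.length) && !(pvLt l[2 * pos + 1]! l[2 * pos + 2]!)) = true
      · rw [if_pos hb]
        simp only [Bool.and_eq_true, decide_eq_true_eq, Bool.not_eq_true'] at hb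
        refine key (2 * pos + 2) (by omega) hb.1 (by unfold hpar; omega) ?_
        intro o ho0 ho hpo hocp
        have ho1 : o = 2 * pos + 1 := by unfold hpar at hpo; omega
        subst ho1
        exact hb.2
      · rw [if_neg hb]
        refine key (2 * pos + 1) (by omega) hch (by unfold hpar; omega) ?_
        intro o ho0 ho hpo hocp
        have ho2 : o = 2 * pos + 2 := by unfold hpar at hpo; omega
        subst ho2
        simp only [Bool.and_eq_true, decide_eq_true_eq, Bool.not_eq_true', not_and] at hb
        have hbb := hb ho
        rw [Bool.not_eq_false] at hbb
        exact pvLt_asymm hbb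
    · rw [dif_neg hch]
      have hval : ∀ c, c < l.length → (l.set pos it)[c]! = if pos = c then it else l[c]! :=
        fun c hc => getBang_set l pos c it hc
      have H1 : ∀ c, 0 < c → c < (l.set pos it).length → hDesc s c → c ≠ s → c ≠ pos →
          pvLt (l.set pos it)[c]! (l.set pos it)[hpar c]! = false := by
        intro c hc0 hclen' hcd hcs hcpos
        have hclen : c < l.length := by simpa using hclen'
        have hparlen : hpar c < l.length := lt_trans (hpar_lt hc0) hclen
        have hparne : hpar c ≠ pos := by
          intro h
          have : 2 * pos + 1 ≤ c := by unfold hpar at h; omega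
          omega
        rw [hval c hclen, if_neg (fun h => hcpos h.symm), hval (hpar c) hparlen,
          if_neg (fun h => hparne h.symm)]
        exact G1 c hc0 hclen hcd hcs hcpos hparne
      have H2 : ∀ c, 0 < c → c < (l.set pos it).length → hpar c = pos →
          pvLt (l.set pos it)[c]! it = false := by
        intro c hc0 hclen' hparc
        exfalso
        have h1 : 2 * pos + 1 ≤ c := by unfold hpar at hparc; omega
        have h2 : c < l.length := by simpa using hclen'
        omega
      have H3 : s < pos → ∀ c, 0 < c → c < (l.set pos it).length → hpar c = pos →
          pvLt (l.set pos it)[c]! (l.set pos it)[hpar pos]! = false := by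
        intro _ c hc0 hclen' hparc
        exfalso
        have h1 : 2 * pos + 1 ≤ c := by unfold hpar at hparc; omega
        have h2 : c < l.length := by simpa using hclen'
        omega
      obtain ⟨slen, sperm, sheap, sunch⟩ :=
        siftdown_spec pos pos (l.set pos it) s it le_rfl (by simpa using hlen) hdesc H1 H2 H3
      rw [List.length_set] at slen sheap sunch
      rw [List.set_set] at sperm
      refine ⟨slen, sperm, sheap, ?_⟩
      intro k hk hkd
      have hkpos : ¬ pos = k := fun h => hkd (h ▸ hdesc)
      rw [sunch k hk hkd, hval k hk, if_neg hkpos]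

-- ---- the heap root is minimal ----
theorem root_min {l : List (Int × Int)} (hh : IsHeap l) :
    ∀ k, k < l.length → pvLt l[k]! l[0]! = false := by
  intro k
  induction k using Nat.strong_induction_on with
  | _ k IH =>
    intro hk
    rcases Nat.eq_zero_or_pos k with h | h
    · subst h; exact pvLt_irrefl _
    · exact pvLt_trans_ff (IH (hpar k) (hpar_lt h) (lt_trans (hpar_lt h) hk)) (hh k h hk)

-- ---- heappush ----
theorem heappush_spec (l : List (Int × Int)) (it : Int × Int) (hh : IsHeap l) :
    (pvHeappush l it).length = l.length + 1 ∧ (pvHeappush l it).Perm (l ++ [it]) ∧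
    IsHeap (pvHeappush l it) := by
  unfold pvHeappush
  have he : (l ++ [it]).length - 1 = l.length := by simp
  rw [he]
  have hlen2 : l.length < (l ++ [it]).length := by simp
  have hget : ∀ c, c < l.length → (l ++ [it])[c]! = l[c]! := by
    intro c hc
    rw [getElem!_pos (l ++ [it]) c (by simp; omega), List.getElem_append_left hc,
      getElem!_pos l c hc]
  have H1 : ∀ c, 0 < c → c < (l ++ [it]).length → hDesc 0 c → c ≠ 0 → c ≠ l.length →
      pvLt (l ++ [it])[c]! (l ++ [it])[hpar c]! = false := by
    intro c hc0 hclen _ _ hcl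
    have hclen' : c < l.length := by simp at hclen; omega
    have hparlen : hpar c < l.length := lt_trans (hpar_lt hc0) hclen'
    rw [hget c hclen', hget (hpar c) hparlen]
    exact hh c hc0 hclen'
  have H2 : ∀ c, 0 < c → c < (l ++ [it]).length → hpar c = l.length →
      pvLt (l ++ [it])[c]! it = false := by
    intro c hc0 hclen hparc
    exfalso
    have h1 : 2 * l.length + 1 ≤ c := by unfold hpar at hparc; omega
    have h2 : c < l.length + 1 := by simpa using hclen
    omega
  have H3 : (0 : Nat) < l.length → ∀ c, 0 < c → c < (l ++ [it]).length → hpar c = l.length →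
      pvLt (l ++ [it])[c]! (l ++ [it])[hpar l.length]! = false := by
    intro _ c hc0 hclen hparc
    exfalso
    have h1 : 2 * l.length + 1 ≤ c := by unfold hpar at hparc; omega
    have h2 : c < l.length + 1 := by simpa using hclen
    omega
  obtain ⟨slen, sperm, sheap, _⟩ :=
    siftdown_spec l.length l.length (l ++ [it]) 0 it le_rfl hlen2 (hDesc_zero _) H1 H2 H3
  have hset : (l ++ [it]).set l.length it = l ++ [it] := by
    apply List.ext_getElem (by simp)
    intro j h1 h2
    rw [List.getElem_set]
    by_cases hj : l.length = j
    · subst hj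
      rw [if_pos rfl, List.getElem_append_right (by omega)]
      simp
    · rw [if_neg hj]
  rw [hset] at sperm
  refine ⟨by simp at slen ⊢; omega, sperm, ?_⟩
  intro c hc0 hclen
  exact sheap c hc0 (by rwa [slen] at hclen) (hDesc_zero c) (by omega)

-- ---- getLast! on a nonempty list ----
theorem getLast_bang : ∀ (l : List (Int × Int)), 0 < l.length → l.getLast! = l[l.length - 1]! := by
  intro l
  induction l with
  | nil => intro h; simp at h
  | cons a t IH =>
    intro _
    cases t with
    | nil => rfl
    | cons b u =>
      have hIH := IH (by simp)
      rw [show ((a :: b :: u : List (Int × Int))).getLast! = (b :: u).getLast! from rfl, hIH]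
      have h1 : ((a :: b :: u : List (Int × Int))).length - 1 = ((b :: u : List (Int × Int))).length - 1 + 1 := by
        simp
      rw [h1, getElem!_pos (b :: u) ((b :: u : List (Int × Int)).length - 1) (by simp),
        getElem!_pos (a :: b :: u) ((b :: u : List (Int × Int)).length - 1 + 1) (by simp),
        List.getElem_cons_succ]
      rfl

-- ---- heappop ----
theorem heappop_spec (l : List (Int × Int)) (hh : IsHeap l) (h0 : 0 < l.length) :
    (pvHeappop l).1 = l[0]! ∧ ((pvHeappop l).1 :: (pvHeappop l).2).Perm l ∧
    IsHeap (pvHeappop l).2 ∧ (pvHeappop l).2.length = l.length - 1 := by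
  have hdropget : ∀ c, c < l.dropLast.length → l.dropLast[c]! = l[c]! := by
    intro c hc
    rw [getElem!_pos l.dropLast c hc, List.getElem_dropLast,
      getElem!_pos l c (by simp at hc ⊢; omega)]
  simp only [pvHeappop]
  by_cases h1 : 0 < l.dropLast.length
  · rw [if_pos h1]
    have hn2 : 2 ≤ l.length := by simp at h1; omega
    have G1 : ∀ c, 0 < c → c < (l.dropLast.set 0 l.getLast!).length → hDesc 0 c → c ≠ 0 →
        c ≠ 0 → hpar c ≠ 0 →
        pvLt (l.dropLast.set 0 l.getLast!)[c]! (l.dropLast.set 0 l.getLast!)[hpar c]! = false := by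
      intro c hc0 hclen' _ _ _ hpar0
      have hclen : c < l.dropLast.length := by simpa using hclen'
      have hparlen : hpar c < l.dropLast.length := lt_trans (hpar_lt hc0) hclen
      rw [getBang_set l.dropLast 0 c _ hclen, if_neg (by omega),
        getBang_set l.dropLast 0 (hpar c) _ hparlen, if_neg (fun h => hpar0 h.symm),
        hdropget c hclen, hdropget (hpar c) hparlen]
      exact hh c hc0 (by simp at hclen ⊢; omega)
    have G2 : (0 : Nat) < 0 → ∀ c, 0 < c → c < (l.dropLast.set 0 l.getLast!).length →
        hpar c = 0 → pvLt (l.dropLast.set 0 l.getLast!)[c]!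
          (l.dropLast.set 0 l.getLast!)[hpar 0]! = false := by
      intro h; exact absurd h (lt_irrefl 0)
    obtain ⟨slen, sperm, sheap, _⟩ :=
      siftup_spec l.dropLast.length 0 (l.dropLast.set 0 l.getLast!) 0 l.getLast!
        (by simp) (by simpa using h1) (hDesc_refl 0) G1 G2
    rw [List.length_set] at slen sperm sheap
    rw [List.set_set] at sperm
    have hfst : l.dropLast[0]! = l[0]! := hdropget 0 h1
    refine ⟨hfst, ?_, ?_, by rw [slen]; simp⟩
    · obtain ⟨x, t, hxt⟩ : ∃ x t, l.dropLast = x :: t := by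
        cases hD : l.dropLast with
        | nil => rw [hD] at h1; simp at h1
        | cons x t => exact ⟨x, t, rfl⟩
      have hx : x = l[0]! := by
        rw [← hfst, hxt, getElem!_pos (x :: t) 0 (by simp)]
        rfl
      have hlne : l ≠ [] := by intro h; rw [h] at h0; simp at h0
      have hdecomp : l.dropLast ++ [l.getLast!] = l := by
        rw [getLast_bang l h0, getElem!_pos l (l.length - 1) (by omega),
          ← List.getLast_eq_getElem hlne]
        exact List.dropLast_append_getLast hlne
      have key : (l.dropLast[0]! :: (l.dropLast.set 0 l.getLast!)).Perm l := by
        rw [hfst, hxt, List.set_cons_zero]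
        have p1 : ((l.getLast! :: t : List (Int × Int))).Perm (t ++ [l.getLast!]) :=
          (List.perm_append_singleton _ _).symm
        have p2 := p1.cons l[0]!
        have e2 : l[0]! :: (t ++ [l.getLast!]) = (x :: t) ++ [l.getLast!] := by
          rw [hx]; rfl
        rw [e2] at p2
        have e3 : (x :: t) ++ [l.getLast!] = l := by rw [← hxt]; exact hdecomp
        rw [e3] at p2
        exact p2
      exact (sperm.cons _).trans key
    · intro c hc0 hclen
      exact sheap c hc0 (by rwa [slen] at hclen) (hDesc_zero c) (by omega)
  · rw [if_neg h1]
    cases l with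
    | nil => simp at h0
    | cons a t =>
      cases t with
      | cons b u => simp at h1
      | nil =>
        refine ⟨rfl, List.Perm.refl _, ?_, by simp⟩
        intro c hc0 hclen
        simp at hclen

-- ---- heapify ----
theorem heapify_aux :
    ∀ (k : Nat) (l : List (Int × Int)), 2 * k ≤ l.length →
      (∀ c, 0 < c → c < l.length → k ≤ hpar c → pvLt l[c]! l[hpar c]! = false) →
      ((List.range k).reverse.foldl (fun h i => pvSiftup h.length i h i h[i]!) l).length = l.length ∧
      ((List.range k).reverse.foldl (fun h i => pvSiftup h.length i h i h[i]!) l).Perm l ∧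
      IsHeap ((List.range k).reverse.foldl (fun h i => pvSiftup h.length i h i h[i]!) l) := by
  intro k
  induction k with
  | zero =>
    intro l _ hk
    refine ⟨by simp, by simp, ?_⟩
    intro c hc0 hclen
    simp only [List.range_zero, List.reverse_nil, List.foldl_nil] at hclen ⊢
    exact hk c hc0 hclen (Nat.zero_le _)
  | succ k IH =>
    intro l h2k hk
    rw [List.range_succ, List.reverse_append, List.reverse_singleton, List.singleton_append,
      List.foldl_cons]
    have hklen : k < l.length := by omega
    have G1 : ∀ c, 0 < c → c < l.length → hDesc k c → c ≠ k → c ≠ k → hpar c ≠ k →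
        pvLt l[c]! l[hpar c]! = false := by
      intro c hc0 hclen hcd hck _ hparck
      have h1 : k ≤ hpar c := hDesc_le (hDesc_par hcd hck)
      exact hk c hc0 hclen (by omega)
    have G2 : k < k → ∀ c, 0 < c → c < l.length → hpar c = k →
        pvLt l[c]! l[hpar k]! = false := by
      intro h; exact absurd h (lt_irrefl k)
    obtain ⟨slen, sperm, sheap, sunch⟩ :=
      siftup_spec l.length k l k l[k]! (Nat.sub_le _ _) hklen (hDesc_refl k) G1 G2
    have hsetid : l.set k l[k]! = l := by
      rw [getElem!_pos l k hklen]; exact List.set_getElem_self _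
    rw [hsetid] at sperm
    have hnext : ∀ c, 0 < c → c < (pvSiftup l.length k l k l[k]!).length → k ≤ hpar c →
        pvLt (pvSiftup l.length k l k l[k]!)[c]! (pvSiftup l.length k l k l[k]!)[hpar c]! = false := by
      intro c hc0 hclen' hkpar
      have hclen : c < l.length := by rwa [slen] at hclen'
      by_cases hdc : hDesc k c
      · have hck : c ≠ k := by have := hpar_lt hc0; omega
        exact sheap c hc0 hclen hdc hck
      · have hdpar : ¬ hDesc k (hpar c) := fun h => hdc (hDesc_child h rfl)
        have hparlen : hpar c < l.length := lt_trans (hpar_lt hc0) hclen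
        rw [sunch c hclen hdc, sunch (hpar c) hparlen hdpar]
        have hparne : hpar c ≠ k := fun h => hdc (hDesc_child (hDesc_refl k) h)
        exact hk c hc0 hclen (by omega)
    obtain ⟨ihlen, ihperm, ihheap⟩ :=
      IH (pvSiftup l.length k l k l[k]!) (by rw [slen]; omega) hnext
    exact ⟨ihlen.trans slen, ihperm.trans sperm, ihheap⟩

theorem heapify_spec (l : List (Int × Int)) :
    (pvHeapify l).length = l.length ∧ (pvHeapify l).Perm l ∧ IsHeap (pvHeapify l) := by
  unfold pvHeapify
  refine heapify_aux (l.length / 2) l (by omega) ?_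
  intro c hc0 hclen hge
  exfalso
  unfold hpar at hge
  omega

-- ---- the multiset of (end_time, machine) pairs encoded by B's flat list ----
def msto (ends : List Int) : List (Int × Int) :=
  (List.range ends.length).map (fun j => (ends.getD j 0, (j : Int)))

theorem msto_length (ends : List Int) : (msto ends).length = ends.length := by simp [msto]

theorem msto_getElem (ends : List Int) (j : Nat) (h : j < ends.length)
    (h2 : j < (msto ends).length) : (msto ends)[j] = (ends[j], (j : Int)) := by
  simp [msto, List.getElem?_eq_getElem h]

theorem msto_set (ends : List Int) (i : Nat) (v : Int) (h : i < ends.length) :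
    msto (ends.set i v) = (msto ends).set i (v, (i : Int)) := by
  apply List.ext_getElem (by simp [msto])
  intro j h1 h2
  have hj : j < ends.length := by
    have := h2
    rw [List.length_set, msto_length] at this
    exact this
  rw [msto_getElem (ends.set i v) j (by simpa using hj) h1, List.getElem_set, List.getElem_set,
    msto_getElem ends j hj (by rw [msto_length]; exact hj)]
  by_cases hij : i = j
  · subst hij; simp
  · simp [hij]

-- ---- the heap root equals B's (min, first index of min) ----
theorem pop_is_argmin {heap : List (Int × Int)} {ends : List Int} {m : Int} {i : Nat}
    (hperm : heap.Perm (msto ends)) (hh : IsHeap heap)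
    (hm : PySem.List.min? ends (fun x => x) = some m)
    (hi : PySem.List.index? ends m = some i)
    (h0 : 0 < heap.length) :
    heap[0]! = (m, (i : Int)) := by
  obtain ⟨hilt, hie, hfirst⟩ := PySem.List.getElem_of_index?_eq_some hi
  have hmem0 : heap[0]! ∈ heap := by
    rw [getElem!_pos heap 0 h0]; exact List.getElem_mem _
  have hx : heap[0]! ∈ msto ends := hperm.mem_iff.mp hmem0
  simp only [msto, List.mem_map, List.mem_range] at hx
  obtain ⟨j, hj, hje⟩ := hx
  rw [List.getD_eq_getElem ends 0 hj] at hje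
  have hmmem : ((m, (i : Int)) : Int × Int) ∈ heap := by
    refine hperm.mem_iff.mpr ?_
    simp only [msto, List.mem_map, List.mem_range]
    exact ⟨i, hilt, by rw [List.getD_eq_getElem ends 0 hilt, hie]⟩
  obtain ⟨k, hk, hke⟩ := List.getElem_of_mem hmmem
  have hroot := root_min hh k hk
  rw [getElem!_pos heap k hk, hke, ← hje] at hroot
  rw [pvLt_eq_false_iff] at hroot
  dsimp only at hroot
  have hmin : m ≤ ends[j] := PySem.List.min?_isMin hm ends[j] (List.getElem_mem hj)
  have hejm : ends[j] = m := by omega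
  have hji : j = i := by
    by_contra hne
    exact hfirst j (by omega) hejm
  rw [← hje, hejm, hji]

-- ---- the main loop: A's heap loop equals B's scan loop ----
theorem loop_eq :
    ∀ (times : List Int) (heap : List (Int × Int)) (ends : List Int) (acc : List Int),
      0 < ends.length → heap.Perm (msto ends) → IsHeap heap →
      (times.foldl
        (fun (st : List (Int × Int) × List Int) time =>
          let p := pvHeappop st.1
          (pvHeappush p.2 (p.1.1 + time, p.1.2), st.2 ++ [p.1.2 + 1]))
        (heap, acc)).2 =
      (times.foldl
        (fun (st : List Int × List Int) time =>
          let m := (PySem.List.min? st.1 (fun x => x)).getD 0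
          let i := (PySem.List.index? st.1 m).getD 0
          (st.1.set i (st.1.getD i 0 + time), st.2 ++ [(i : Int) + 1]))
        (ends, acc)).2 := by
  intro times
  induction times with
  | nil => intro heap ends acc _ _ _; rfl
  | cons t ts IH =>
    intro heap ends acc h0 hperm hheap
    have hne : ends ≠ [] := by intro h; rw [h] at h0; simp at h0
    cases hm : PySem.List.min? ends (fun x => x) with
    | none => exact absurd ((PySem.List.min?_eq_none_iff ends _).mp hm) hne
    | some m =>
    have hmem := PySem.List.min?_mem hm
    have hisome : (PySem.List.index? ends m).isSome = true :=
      (PySem.List.index?_isSome_iff ends m).mpr hmem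
    cases hi : PySem.List.index? ends m with
    | none => rw [hi] at hisome; simp at hisome
    | some i =>
    obtain ⟨hilt, hie, hfirst⟩ := PySem.List.getElem_of_index?_eq_some hi
    have hperm_len : heap.length = ends.length := hperm.length_eq.trans (msto_length _)
    have h0h : 0 < heap.length := by omega
    obtain ⟨hp1, hpperm, hpheap, hplen⟩ := heappop_spec heap hheap h0h
    have hroot : heap[0]! = (m, (i : Int)) := pop_is_argmin hperm hheap hm hi h0h
    have hp1' : (pvHeappop heap).1 = (m, (i : Int)) := hp1.trans hroot
    simp only [List.foldl_cons]
    simp only [hp1', hm, Option.getD_some, hi]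
    rw [List.getD_eq_getElem ends 0 hilt]
    simp only [hie]
    -- invariants for the tail
    obtain ⟨hqlen, hqperm, hqheap⟩ := heappush_spec (pvHeappop heap).2 (m + t, (i : Int)) hpheap
    have hmi : i < (msto ends).length := by rw [msto_length]; exact hilt
    have hmid : (msto ends)[i] = (m, (i : Int)) := by
      rw [msto_getElem ends i hilt hmi, hie]
    have hdec : msto ends = (msto ends).take i ++ (m, (i : Int)) :: (msto ends).drop (i + 1) := by
      conv_lhs => rw [← List.take_append_drop i (msto ends)]
      rw [List.drop_eq_getElem_cons hmi, hmid]
    have hT : ((msto ends).take i).length = i := by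
      rw [List.length_take]; omega
    have hstep : ((m, (i : Int)) :: (pvHeappop heap).2).Perm
        ((m, (i : Int)) :: ((msto ends).take i ++ (msto ends).drop (i + 1))) := by
      have h1 : ((m, (i : Int)) :: (pvHeappop heap).2) =
          ((pvHeappop heap).1 :: (pvHeappop heap).2) := by rw [hp1']
      rw [h1]
      have hmid2 : (msto ends).Perm
          ((m, (i : Int)) :: ((msto ends).take i ++ (msto ends).drop (i + 1))) := by
        conv_lhs => rw [hdec]
        exact List.perm_middle
      exact hpperm.trans (hperm.trans hmid2)
    have hpop2 := hstep.cons_inv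
    have hperm' : (pvHeappush (pvHeappop heap).2 (m + t, (i : Int))).Perm
        (msto (ends.set i (m + t))) := by
      have e1 : msto (ends.set i (m + t)) =
          (msto ends).take i ++ (m + t, (i : Int)) :: (msto ends).drop (i + 1) := by
        rw [msto_set ends i (m + t) hilt]
        conv_lhs => rw [hdec]
        rw [List.set_append_right _ _ (by omega), hT, Nat.sub_self, List.set_cons_zero]
      rw [e1]
      exact hqperm.trans ((hpop2.append_right _).trans
        ((List.perm_append_singleton _ _).trans List.perm_middle.symm))
    exact IH _ _ _ (by simpa using h0) hperm' hqheap

-- ---- the initial heap is the multiset of N zero end-times ----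
theorem init_eq (N : Int) :
    (PySem.List.pyRange 0 N 1).map (fun i => ((0 : Int), i)) =
      msto (PySem.List.pyRepeat [(0 : Int)] N) := by
  rw [PySem.List.pyRepeat_singleton, PySem.List.pyRange_one]
  unfold msto
  rw [List.length_replicate, List.map_map]
  simp only [sub_zero]
  apply List.map_congr_left
  intro j hj
  rw [List.mem_range] at hj
  simp [Function.comp]

-- ===== VERDICT (by name: the statement is the Claim_ definition above) =====
theorem solution_spec : Claim_equal_solution := by
  intro N ct hdom hpre
  unfold Spec_solution
  cases ct with
  | nil => rfl
  | cons t ts =>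
    have hN : (1 : Int) ≤ N := by
      rcases hpre with h | h
      · exact h
      · exact absurd h (by simp)
    unfold solution solution_alt
    obtain ⟨hhlen, hhperm, hhheap⟩ :=
      heapify_spec ((PySem.List.pyRange 0 N 1).map (fun i => ((0 : Int), i)))
    have h0 : 0 < (PySem.List.pyRepeat [(0 : Int)] N).length := by
      rw [PySem.List.pyRepeat_singleton, List.length_replicate]
      omega
    exact loop_eq (t :: ts) _ _ [] h0 (by rw [← init_eq N]; exact hhperm) hhheap
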